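-- pv_equiv track=rewrite | github.com/kingkaushalagarwal/100daysofcoding | heap/minimum_largest_element.py | solve
-- ===== SOURCE A (Python) =====
-- import heapq
--
-- def solve(A, B):
--     pq =[]
--     for i in range(len(A)):
--         pq.append([A[i]*2,i])
--     heapq.heapify(pq)
--     maxx =max(A)
--     while B>0:
--         node,i = heapq.heappop(pq)
--         maxx = max(maxx,node)
--         heapq.heappush(pq,[node+A[i],i])
--         B-=1
--     return maxx
-- ===== SOURCE B (Python) =====
-- def solve(A, B):
--     maxx = max(A)
--     mn = min(A)
--     # If B <= 0 no pop happens; if mn <= 0 the heap keeps popping a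
--     # non-increasing stream of values <= 2*mn <= max(A), so the answer is max(A).
--     if B <= 0 or mn <= 0:
--         return maxx
--     # B-th smallest element of {k*a : a in A, k >= 2} by binary search on the
--     # value, counting multiples <= v with floor division.
--     def count(v):
--         return sum(max(0, v // a - 1) for a in A)
--     lo, hi = 1, (B + 1) * mn
--     while lo + 1 < hi:
--         mid = (lo + hi) // 2
--         if count(mid) >= B:
--             hi = mid
--         else:
--             lo = mid
--     return max(maxx, hi)
-- ===== Notes on version B (the rewrite author's own statement) =====
-- stated objective: alternative
-- what changed: A simulates B heap pops over the streams of multiples; B returns max(A) directly when B <= 0 or min(A) <= 0 (the popped values then never exceed max(A)) and otherwise binary-searches the B-th smallest multiple k*a (k>=2) by counting multiples <= v with floor division; this trades A's O(B log n) pops for O(n log(B*min(A))) counting, which wins for large B but loses for long lists with small B.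
-- outside the precondition, e.g. on solve([], 3): A raises ValueError, B raises ValueError
import Mathlib
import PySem

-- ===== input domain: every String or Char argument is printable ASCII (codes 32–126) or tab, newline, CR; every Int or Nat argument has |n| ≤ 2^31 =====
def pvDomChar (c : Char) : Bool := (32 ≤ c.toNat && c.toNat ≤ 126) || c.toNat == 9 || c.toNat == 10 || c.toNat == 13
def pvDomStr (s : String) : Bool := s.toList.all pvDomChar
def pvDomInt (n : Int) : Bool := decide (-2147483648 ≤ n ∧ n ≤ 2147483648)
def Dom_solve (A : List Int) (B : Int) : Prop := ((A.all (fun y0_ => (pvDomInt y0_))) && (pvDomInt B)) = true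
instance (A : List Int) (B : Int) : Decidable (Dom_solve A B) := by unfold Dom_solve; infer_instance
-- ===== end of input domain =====

-- B replaces A's B-round heap simulation by a binary search on the answer value,
-- counting multiples ≤ v with floor division (alternative algorithm; cost is
-- lower for large B, higher for long lists with small B).

-- ===== PORT A =====
-- heapq on [node, i] lists pops the lexicographically least pair; pq entries
-- always carry distinct i, so "remove the lex-least pair" is exact.
def lexLt (x y : Int × Nat) : Bool := x.1 < y.1 || (x.1 == y.1 && x.2 < y.2)

def findMin (x : Int × Nat) (xs : List (Int × Nat)) : Int × Nat :=
  xs.foldl (fun m y => if lexLt y m then y else m) x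

def solveLoop (A : List Int) : Nat → List (Int × Nat) → Int → Int
  | 0, _, maxx => maxx
  | _+1, [], maxx => maxx          -- unreachable: pq is nonempty whenever A ≠ []
  | t+1, x :: xs, maxx =>
    let p := findMin x xs
    solveLoop A t ((x :: xs).erase p ++ [(p.1 + A.getD p.2 0, p.2)]) (max maxx p.1)

def solve (A : List Int) (B : Int) : Int :=
  match A with
  | [] => 0                        -- unreachable under Pre_solve: max([]) raises
  | x :: xs =>
    solveLoop A B.toNat ((List.range A.length).map (fun i => (A.getD i 0 * 2, i))) (xs.foldl max x)

-- ===== PORT B =====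
def countMul (A : List Int) (v : Int) : Int :=
  (A.map (fun a => max 0 (PySem.Int.floordiv v a - 1))).sum

def bsearch (A : List Int) (B : Int) : Nat → Int → Int → Int
  | 0, _, hi => hi
  | f+1, lo, hi =>
    if lo + 1 < hi then
      let mid := PySem.Int.floordiv (lo + hi) 2
      if B ≤ countMul A mid then bsearch A B f lo mid
      else bsearch A B f mid hi
    else hi

def solve_alt (A : List Int) (B : Int) : Int :=
  match A with
  | [] => 0                        -- unreachable under Pre_solve
  | x :: xs =>
    let maxx := xs.foldl max x
    let mn := xs.foldl min x
    if B ≤ 0 ∨ mn ≤ 0 then maxx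
    else max maxx (bsearch A B ((B + 1) * mn - 1).toNat 1 ((B + 1) * mn))

-- ===== PRECONDITION & SPEC =====
-- Pre_ excludes only the empty list, on which A's max(A) raises ValueError.
def Pre_solve (A : List Int) (B : Int) : Prop := A ≠ []
instance (A : List Int) (B : Int) : Decidable (Pre_solve A B) := by unfold Pre_solve; infer_instance
def pvWitness_solve : List Int × Int := ([3, 1, 2], 4)

def Spec_solve (A : List Int) (B : Int) (out : Int) : Prop := out = solve_alt A B
instance (A : List Int) (B : Int) (out : Int) : Decidable (Spec_solve A B out) := by unfold Spec_solve; infer_instance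

-- ===== CLAIM (what is proved, stated in full; the proofs are below) =====
def Claim_equal_solve : Prop := ∀ (A : List Int) (B : Int), Dom_solve A B → Pre_solve A B → Spec_solve A B (solve A B)

-- ===== LEMMAS AND PROOFS =====

lemma fm_mem (xs : List (Int × Nat)) (x : Int × Nat) : findMin x xs ∈ x :: xs := by
  induction xs generalizing x with
  | nil => simp [findMin]
  | cons y ys ih =>
    have h : findMin x (y :: ys) = findMin (if lexLt y x then y else x) ys := rfl
    rw [h]
    rcases List.mem_cons.mp (ih (if lexLt y x then y else x)) with hm | hm
    · rw [hm]; split <;> simp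
    · simp [hm]

lemma lexLt_le {x y : Int × Nat} (h : lexLt x y = true) : x.1 ≤ y.1 := by
  simp [lexLt] at h
  rcases h with h | ⟨h, _⟩ <;> omega

lemma lexLt_not_le {x y : Int × Nat} (h : ¬ lexLt x y = true) : y.1 ≤ x.1 := by
  simp [lexLt] at h
  omega

lemma fm_le (xs : List (Int × Nat)) (x : Int × Nat) : ∀ y ∈ x :: xs, (findMin x xs).1 ≤ y.1 := by
  induction xs generalizing x with
  | nil => intro y hy; simp at hy; simp [findMin, hy]
  | cons z zs ih =>
    intro y hy
    have h : findMin x (z :: zs) = findMin (if lexLt z x then z else x) zs := rfl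
    rw [h]
    have hacc : (findMin (if lexLt z x then z else x) zs).1 ≤ (if lexLt z x then z else x).1 :=
      ih _ _ (List.mem_cons_self ..)
    rcases List.mem_cons.mp hy with rfl | hy
    · refine le_trans hacc ?_
      split
      · exact lexLt_le ‹_›
      · exact le_rfl
    rcases List.mem_cons.mp hy with rfl | hy
    · refine le_trans hacc ?_
      split
      · exact le_rfl
      · exact lexLt_not_le ‹_›
    · exact ih _ _ (List.mem_cons_of_mem _ hy)

-- Case mn ≤ 0: the heap keeps popping values ≤ 2*mn, so maxx never changes.
lemma loop2 (A : List Int) (mn maxx : Int) (hmn : mn ≤ 0) (hmx : 2 * mn ≤ maxx) :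
    ∀ (f : Nat) (pq : List (Int × Nat)),
      (∀ p ∈ pq, 0 < A.getD p.2 0 → 2 * A.getD p.2 0 ≤ p.1) →
      (∃ p ∈ pq, p.1 ≤ 2 * mn) →
      solveLoop A f pq maxx = maxx := by
  intro f
  induction f with
  | zero => intro pq _ _; rfl
  | succ f ih =>
    intro pq h1 h2
    match pq with
    | [] => rcases h2 with ⟨p, hp, _⟩; simp at hp
    | x :: xs =>
      obtain ⟨w, hw, hwv⟩ := h2
      have hpv : (findMin x xs).1 ≤ 2 * mn := le_trans (fm_le xs x w hw) hwv
      have hneg : A.getD (findMin x xs).2 0 ≤ 0 := by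
        by_contra hpos
        push Not at hpos
        have := h1 _ (fm_mem xs x) hpos
        omega
      show solveLoop A f _ (max maxx (findMin x xs).1) = maxx
      rw [max_eq_left (by omega)]
      apply ih
      · intro p hp
        rcases List.mem_append.mp hp with hp | hp
        · exact h1 p (List.erase_subset hp)
        · rw [List.mem_singleton] at hp
          subst hp
          show 0 < A.getD (findMin x xs).2 0 → 2 * A.getD (findMin x xs).2 0 ≤ (findMin x xs).1 + A.getD (findMin x xs).2 0
          intro hpos; omega
      · refine ⟨((findMin x xs).1 + A.getD (findMin x xs).2 0, (findMin x xs).2),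
          List.mem_append.mpr (Or.inr (List.mem_singleton.mpr rfl)), ?_⟩
        show (findMin x xs).1 + A.getD (findMin x xs).2 0 ≤ 2 * mn
        omega

-- Case mn ≥ 1: heap-state characterisation.
def pqFrontier (A : List Int) (c : Nat → Nat) : List (Int × Nat) :=
  (List.range A.length).map (fun i => ((2 + (c i : Int)) * A.getD i 0, i))

def Inv3 (A : List Int) (maxA : Int) (t : Nat) (pq : List (Int × Nat)) (maxx : Int) : Prop :=
  ∃ (c : Nat → Nat) (m : Int),
    pq.Perm (pqFrontier A c) ∧
    (∑ i ∈ Finset.range A.length, c i) = t ∧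
    maxx = max maxA m ∧
    (∀ i < A.length, m ≤ (2 + (c i : Int)) * A.getD i 0) ∧
    (∀ i < A.length, 1 ≤ c i → (1 + (c i : Int)) * A.getD i 0 ≤ m) ∧
    ((∀ i < A.length, c i = 0) ∨ ∃ j, j < A.length ∧ 1 ≤ c j ∧ m = (1 + (c j : Int)) * A.getD j 0)

lemma step3 (A : List Int) (maxA : Int) (ha : ∀ i < A.length, 1 ≤ A.getD i 0)
    (t : Nat) (x : Int × Nat) (xs : List (Int × Nat)) (maxx : Int)
    (hInv : Inv3 A maxA t (x :: xs) maxx) :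
    Inv3 A maxA (t + 1)
      ((x :: xs).erase (findMin x xs) ++
        [((findMin x xs).1 + A.getD (findMin x xs).2 0, (findMin x xs).2)])
      (max maxx (findMin x xs).1) := by
  unfold Inv3 at hInv ⊢
  obtain ⟨c, m, hperm, hsum, hmaxx, hub, hlb, hdisj⟩ := hInv
  set p := findMin x xs with hpdef
  have hpmem : p ∈ x :: xs := fm_mem xs x
  have hpF : p ∈ pqFrontier A c := hperm.mem_iff.mp hpmem
  obtain ⟨i0, hi0r, hpe⟩ := List.mem_map.mp hpF
  have hi0 : i0 < A.length := List.mem_range.mp hi0r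
  have hp2 : p.2 = i0 := by rw [← hpe]
  have hp1 : p.1 = (2 + (c i0 : Int)) * A.getD i0 0 := by rw [← hpe]
  have ha0 : (1:Int) ≤ A.getD i0 0 := ha i0 hi0
  have hmp : m ≤ p.1 := by rw [hp1]; exact hub i0 hi0
  refine ⟨Function.update c i0 (c i0 + 1), p.1, ?_, ?_, ?_, ?_, ?_, ?_⟩
  · -- the new pq is a permutation of the updated frontier
    have hR : (List.range A.length).Perm (i0 :: (List.range A.length).erase i0) :=
      List.perm_cons_erase hi0r
    have h1 : ((x :: xs).erase p).Perm
        (((List.range A.length).erase i0).map (fun i => ((2 + (c i : Int)) * A.getD i 0, i))) := by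
      have h2 := (hperm.trans (hR.map _)).erase p
      rw [List.map_cons] at h2
      rw [hpe] at h2
      rwa [List.erase_cons_head] at h2
    have he : (p.1 + A.getD p.2 0, p.2) =
        ((2 + ((Function.update c i0 (c i0 + 1)) i0 : Int)) * A.getD i0 0, i0) := by
      rw [hp1, hp2]
      simp only [Function.update_apply, if_pos rfl]
      rw [Prod.mk.injEq]
      refine ⟨?_, rfl⟩
      push_cast
      ring
    have hmapeq : ((List.range A.length).erase i0).map
          (fun i => ((2 + (c i : Int)) * A.getD i 0, i)) =
        ((List.range A.length).erase i0).map
          (fun i => ((2 + ((Function.update c i0 (c i0 + 1)) i : Int)) * A.getD i 0, i)) := by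
      apply List.map_congr_left
      intro i hi
      have hne : i ≠ i0 := ((List.nodup_range).mem_erase_iff.mp hi).1
      rw [Function.update_apply, if_neg hne]
    refine List.Perm.trans
      (List.Perm.trans (h1.append_right _) (List.perm_append_singleton _ _)) ?_
    rw [he, hmapeq]
    have hlast := (hR.symm).map
      (fun i => ((2 + ((Function.update c i0 (c i0 + 1)) i : Int)) * A.getD i 0, i))
    rw [List.map_cons] at hlast
    exact hlast
  · have h1 := Finset.sum_update_of_mem (Finset.mem_range.mpr hi0) c (c i0 + 1)
    have h2 := Finset.sum_eq_add_sum_diff_singleton (s := Finset.range A.length) i0 c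
      (fun h => (h (Finset.mem_range.mpr hi0)).elim)
    omega
  · rw [hmaxx, max_assoc, max_eq_right hmp]
  · intro i hi
    by_cases hii : i = i0
    · subst hii
      rw [hp1, Function.update_apply, if_pos rfl]
      push_cast
      nlinarith [ha i hi]
    · rw [Function.update_apply, if_neg hii]
      have hgF : ((2 + (c i : Int)) * A.getD i 0, i) ∈ pqFrontier A c :=
        List.mem_map.mpr ⟨i, List.mem_range.mpr hi, rfl⟩
      have hmem2 : ((2 + (c i : Int)) * A.getD i 0, i) ∈ x :: xs := hperm.mem_iff.mpr hgF
      simpa using fm_le xs x _ hmem2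
  · intro i hi hci
    by_cases hii : i = i0
    · subst hii
      rw [hp1, Function.update_apply, if_pos rfl]
      push_cast
      nlinarith
    · rw [Function.update_apply, if_neg hii] at hci ⊢
      exact le_trans (hlb i hi hci) hmp
  · right
    refine ⟨i0, hi0, ?_, ?_⟩
    · rw [Function.update_apply, if_pos rfl]; omega
    · rw [hp1, Function.update_apply, if_pos rfl]
      push_cast
      ring

lemma loop3 (A : List Int) (maxA : Int) (ha : ∀ i < A.length, 1 ≤ A.getD i 0)
    (hn : 0 < A.length) :
    ∀ (f t : Nat) (pq : List (Int × Nat)) (maxx : Int),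
      Inv3 A maxA t pq maxx →
      ∃ (c : Nat → Nat) (m : Int),
        (∑ i ∈ Finset.range A.length, c i) = t + f ∧
        solveLoop A f pq maxx = max maxA m ∧
        (∀ i < A.length, m ≤ (2 + (c i : Int)) * A.getD i 0) ∧
        (∀ i < A.length, 1 ≤ c i → (1 + (c i : Int)) * A.getD i 0 ≤ m) ∧
        ((∀ i < A.length, c i = 0) ∨ ∃ j, j < A.length ∧ 1 ≤ c j ∧ m = (1 + (c j : Int)) * A.getD j 0) := by
  intro f
  induction f with
  | zero =>
    intro t pq maxx hInv
    unfold Inv3 at hInv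
    obtain ⟨c, m, _, hsum, hmaxx, hub, hlb, hdisj⟩ := hInv
    exact ⟨c, m, by omega, hmaxx, hub, hlb, hdisj⟩
  | succ f ih =>
    intro t pq maxx hInv
    match pq with
    | [] =>
      exfalso
      obtain ⟨c, m, hperm, _⟩ := hInv
      have hlen := hperm.length_eq
      simp [pqFrontier] at hlen
      omega
    | x :: xs =>
      obtain ⟨c, m, hs, hrest⟩ := ih (t + 1) _ _ (step3 A maxA ha t x xs maxx hInv)
      exact ⟨c, m, by omega, hrest⟩

lemma sum_map_getD (A : List Int) (f : Int → Int) :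
    (A.map f).sum = ∑ i ∈ Finset.range A.length, f (A.getD i 0) := by
  induction A with
  | nil => simp
  | cons x xs ih =>
    simp only [List.map_cons, List.sum_cons, List.length_cons, ih]
    rw [Finset.sum_range_succ']
    simp only [List.getD_cons_succ, List.getD_cons_zero]
    ring

lemma count_mono (A : List Int) (hpos : ∀ y ∈ A, 1 ≤ y) {v w : Int} (hvw : v ≤ w) :
    countMul A v ≤ countMul A w := by
  unfold countMul
  apply List.sum_le_sum
  intro a hA
  have ha1 : (1:Int) ≤ a := hpos a hA
  have hq := (PySem.Int.le_floordiv_iff_mul_le (a := v) (b := a) (by omega)).mp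
    (le_refl (PySem.Int.floordiv v a))
  have hfd : PySem.Int.floordiv v a ≤ PySem.Int.floordiv w a := by
    rw [PySem.Int.le_floordiv_iff_mul_le (by omega)]
    linarith
  exact max_le_max le_rfl (by omega)

lemma bsearch_eq (A : List Int) (B m : Int) (hpos : ∀ y ∈ A, 1 ≤ y)
    (hm1 : B ≤ countMul A m) (hm2 : countMul A (m - 1) < B) :
    ∀ (fuel : Nat) (lo hi : Int), countMul A lo < B → B ≤ countMul A hi →
      lo < m → m ≤ hi → hi ≤ lo + fuel → bsearch A B fuel lo hi = m := by
  intro fuel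
  induction fuel with
  | zero => intro lo hi _ _ h3 h4 h5; exfalso; omega
  | succ f ih =>
    intro lo hi h1 h2 h3 h4 h5
    simp only [bsearch]
    by_cases hlh : lo + 1 < hi
    · rw [if_pos hlh]
      have hmid1 : lo + 1 ≤ PySem.Int.floordiv (lo + hi) 2 := by
        rw [PySem.Int.le_floordiv_iff_mul_le (by omega)]; omega
      have hmid2 : PySem.Int.floordiv (lo + hi) 2 < hi := by
        rw [PySem.Int.floordiv_lt_iff_lt_mul (by omega)]; omega
      by_cases hc : B ≤ countMul A (PySem.Int.floordiv (lo + hi) 2)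
      · rw [if_pos hc]
        refine ih lo _ h1 hc h3 ?_ (by omega)
        by_contra hmm
        push Not at hmm
        have := count_mono A hpos (v := PySem.Int.floordiv (lo + hi) 2) (w := m - 1) (by omega)
        omega
      · rw [if_neg hc]
        push Not at hc
        refine ih _ hi hc h2 ?_ h4 (by omega)
        by_contra hmm
        push Not at hmm
        have := count_mono A hpos (v := m) (w := PySem.Int.floordiv (lo + hi) 2) (by omega)
        omega
    · rw [if_neg hlh]
      omega

-- ===== VERDICT (by name: the statement is the Claim_ definition above) =====
lemma countMul_eq (A : List Int) (v : Int) :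
    countMul A v = ∑ i ∈ Finset.range A.length,
      max 0 (PySem.Int.floordiv v (A.getD i 0) - 1) :=
  sum_map_getD A _

theorem solve_spec : Claim_equal_solve := by
  unfold Claim_equal_solve
  intro A B _ hPre
  unfold Spec_solve
  match A with
  | [] => exact absurd rfl hPre
  | x :: xs =>
    have hmaxf := PySem.List.le_foldl_max xs x
    have hminf := PySem.List.foldl_min_le xs x
    have hminA : ∀ y ∈ x :: xs, xs.foldl min x ≤ y := by
      intro y hy
      rcases List.mem_cons.mp hy with rfl | hy
      · exact hminf.1
      · exact hminf.2 y hy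
    have hmnmem : xs.foldl min x ∈ x :: xs := by
      rcases PySem.List.foldl_min_mem xs x with h | h
      · rw [h]; exact List.mem_cons_self ..
      · exact List.mem_cons_of_mem _ h
    have hmnmax : xs.foldl min x ≤ xs.foldl max x := le_trans hminf.1 hmaxf.1
    show solve (x :: xs) B = solve_alt (x :: xs) B
    rw [solve, solve_alt]
    by_cases hB : B ≤ 0
    · rw [if_pos (Or.inl hB), Int.toNat_of_nonpos hB]
      rfl
    · by_cases hmn0 : xs.foldl min x ≤ 0
      · rw [if_pos (Or.inr hmn0)]
        apply loop2 (x :: xs) (xs.foldl min x) _ hmn0 (by omega)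
        · intro p hp
          obtain ⟨i, hir, hpe⟩ := List.mem_map.mp hp
          rw [← hpe]
          intro _
          show 2 * (x :: xs).getD i 0 ≤ (x :: xs).getD i 0 * 2
          omega
        · obtain ⟨k, hk, hke⟩ := List.getElem_of_mem hmnmem
          refine ⟨((x :: xs).getD k 0 * 2, k),
            List.mem_map.mpr ⟨k, List.mem_range.mpr hk, rfl⟩, ?_⟩
          show (x :: xs).getD k 0 * 2 ≤ 2 * xs.foldl min x
          rw [List.getD_eq_getElem _ _ hk, hke]
          omega
      · -- all elements positive: heap result = B-th smallest multiple, found by binary search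
        push Not at hB hmn0
        rw [if_neg (by rintro (h | h) <;> omega)]
        have hposA : ∀ y ∈ x :: xs, (1:Int) ≤ y := fun y hy => le_trans hmn0 (hminA y hy)
        have ha : ∀ i < (x :: xs).length, (1:Int) ≤ (x :: xs).getD i 0 := by
          intro i hi
          rw [List.getD_eq_getElem _ _ hi]
          exact hposA _ (List.getElem_mem hi)
        have hinit : Inv3 (x :: xs) (xs.foldl max x) 0
            ((List.range (x :: xs).length).map (fun i => ((x :: xs).getD i 0 * 2, i)))
            (xs.foldl max x) := by
          refine ⟨fun _ => 0, min (xs.foldl max x) (2 * xs.foldl min x), ?_, by simp,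
            (max_eq_left (min_le_left _ _)).symm, ?_, by intro i hi h; simp at h,
            Or.inl (fun i _ => rfl)⟩
          · unfold pqFrontier
            rw [List.map_congr_left (l := List.range (x :: xs).length)
              (f := fun i => ((x :: xs).getD i 0 * 2, i))
              (g := fun i => ((2 + ((0:Nat) : Int)) * (x :: xs).getD i 0, i))
              (fun i _ => by rw [Prod.mk.injEq]; exact ⟨by push_cast; ring, rfl⟩)]
          · intro i hi
            have h1 := ha i hi
            have h2 : xs.foldl min x ≤ (x :: xs).getD i 0 := by
              rw [List.getD_eq_getElem _ _ hi]
              exact hminA _ (List.getElem_mem hi)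
            have h3 : min (xs.foldl max x) (2 * xs.foldl min x) ≤ 2 * xs.foldl min x :=
              min_le_right _ _
            push_cast
            omega
        obtain ⟨c, m, hsum, heq, hub, hlb, hdisj⟩ :=
          loop3 (x :: xs) (xs.foldl max x) ha (by simp) B.toNat 0 _ _ hinit
        rw [heq]
        have hBt : (B.toNat : Int) = B := Int.toNat_of_nonneg (by omega)
        have hsum' : (∑ i ∈ Finset.range (x :: xs).length, (c i : Int)) = B := by
          rw [← Nat.cast_sum, hsum]
          omega
        obtain ⟨j, hj, hcj, hm⟩ : ∃ j, j < (x :: xs).length ∧ 1 ≤ c j ∧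
            m = (1 + (c j : Int)) * (x :: xs).getD j 0 := by
          rcases hdisj with h | h
          · exfalso
            have h0 : (∑ i ∈ Finset.range (x :: xs).length, c i) = 0 :=
              Finset.sum_eq_zero (fun i hi => h i (Finset.mem_range.mp hi))
            omega
          · exact h
        have hcjZ : (1:Int) ≤ (c j : Int) := by exact_mod_cast hcj
        have haj : (1:Int) ≤ (x :: xs).getD j 0 := ha j hj
        have hcm : B ≤ countMul (x :: xs) m := by
          rw [countMul_eq, ← hsum']
          apply Finset.sum_le_sum
          intro i hir
          have hi := Finset.mem_range.mp hir
          by_cases h0 : c i = 0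
          · rw [h0]
            exact_mod_cast le_max_left 0 _
          · have hfd : (1 + (c i : Int)) ≤ PySem.Int.floordiv m ((x :: xs).getD i 0) := by
              rw [PySem.Int.le_floordiv_iff_mul_le (by have := ha i hi; omega)]
              exact hlb i hi (by omega)
            have : (c i : Int) ≤ PySem.Int.floordiv m ((x :: xs).getD i 0) - 1 := by omega
            exact le_trans this (le_max_right _ _)
        have htermb : ∀ i < (x :: xs).length,
            max 0 (PySem.Int.floordiv (m - 1) ((x :: xs).getD i 0) - 1) ≤ (c i : Int) := by
          intro i hi
          have hfd : PySem.Int.floordiv (m - 1) ((x :: xs).getD i 0) < 2 + (c i : Int) := by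
            rw [PySem.Int.floordiv_lt_iff_lt_mul (by have := ha i hi; omega)]
            have := hub i hi
            omega
          exact max_le (by positivity) (by omega)
        have htermj : max 0 (PySem.Int.floordiv (m - 1) ((x :: xs).getD j 0) - 1) ≤ (c j : Int) - 1 := by
          have hfd : PySem.Int.floordiv (m - 1) ((x :: xs).getD j 0) < 1 + (c j : Int) := by
            rw [PySem.Int.floordiv_lt_iff_lt_mul (by omega)]
            omega
          exact max_le (by omega) (by omega)
        have hcm1 : countMul (x :: xs) (m - 1) < B := by
          rw [countMul_eq]
          have hjmem : j ∈ Finset.range (x :: xs).length := Finset.mem_range.mpr hj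
          rw [Finset.sum_eq_add_sum_diff_singleton (s := Finset.range (x :: xs).length) j _
            (fun h => (h hjmem).elim)]
          have hd : (∑ i ∈ Finset.range (x :: xs).length \ {j},
              max 0 (PySem.Int.floordiv (m - 1) ((x :: xs).getD i 0) - 1)) ≤
              ∑ i ∈ Finset.range (x :: xs).length \ {j}, (c i : Int) := by
            apply Finset.sum_le_sum
            intro i hi
            exact htermb i (Finset.mem_range.mp (Finset.mem_sdiff.mp hi).1)
          have hc2 : (∑ i ∈ Finset.range (x :: xs).length, (c i : Int)) =
              (c j : Int) + ∑ i ∈ Finset.range (x :: xs).length \ {j}, (c i : Int) :=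
            Finset.sum_eq_add_sum_diff_singleton (s := Finset.range (x :: xs).length) j _
              (fun h => (h hjmem).elim)
          omega
        have hone : countMul (x :: xs) 1 < B := by
          have h0 : countMul (x :: xs) 1 = 0 := by
            apply List.sum_eq_zero
            intro y hy
            obtain ⟨a, haA, rfl⟩ := List.mem_map.mp hy
            have ha1 := hposA a haA
            have hlt : PySem.Int.floordiv 1 a < 2 := by
              rw [PySem.Int.floordiv_lt_iff_lt_mul (by omega)]
              omega
            have hge : 0 ≤ PySem.Int.floordiv 1 a := by
              rw [PySem.Int.le_floordiv_iff_mul_le (by omega)]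
              omega
            have : PySem.Int.floordiv 1 a - 1 ≤ 0 := by omega
            exact max_eq_left this
          omega
        have hhi : B ≤ countMul (x :: xs) ((B + 1) * xs.foldl min x) := by
          have hfd : PySem.Int.floordiv ((B + 1) * xs.foldl min x) (xs.foldl min x) = B + 1 := by
            rw [PySem.Int.floordiv_eq_iff_of_pos (by omega)]
            exact ⟨le_rfl, by nlinarith⟩
          have hterm : max 0 (PySem.Int.floordiv ((B + 1) * xs.foldl min x) (xs.foldl min x) - 1) = B := by
            rw [hfd]
            have h1 : B + 1 - 1 = B := by ring
            rw [h1]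
            exact max_eq_right (by omega)
          calc B = max 0 (PySem.Int.floordiv ((B + 1) * xs.foldl min x) (xs.foldl min x) - 1) :=
              hterm.symm
            _ ≤ countMul (x :: xs) ((B + 1) * xs.foldl min x) := by
              apply List.single_le_sum
              · intro y hy
                obtain ⟨a, _, rfl⟩ := List.mem_map.mp hy
                exact le_max_left _ _
              · exact List.mem_map_of_mem hmnmem
        have h1m : 1 < m := by
          rw [hm]
          nlinarith
        have hmhi : m ≤ (B + 1) * xs.foldl min x := by
          by_contra hc2
          push Not at hc2
          have := count_mono (x :: xs) hposA (v := (B + 1) * xs.foldl min x) (w := m - 1) (by omega)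
          omega
        have h2hi : 2 ≤ (B + 1) * xs.foldl min x := by nlinarith
        have hfuel : (B + 1) * xs.foldl min x ≤ 1 + (((B + 1) * xs.foldl min x - 1).toNat : Int) := by
          rw [Int.toNat_of_nonneg (by omega)]
          omega
        rw [bsearch_eq (x :: xs) B m hposA hcm hcm1 _ 1 _ hone hhi h1m hmhi hfuel]
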